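-- pv_equiv track=rewrite | github.com/shenweiss/ez-detect | python/evt_metrics.py | proportion_of
-- ===== SOURCE A (Python) =====
-- from math import inf as INFINITY
--
-- def binarySearch(interval, intervals):
--     if len(intervals) == 0 :
--         return 0
--
--     return binarySearchRec(interval, intervals, 0, len(intervals)-1)
--
-- def binarySearchRec(interval, intervals, low, high):
--     if high <= low:
--         return low+1 if (interval >= intervals[low]) else low
--
--     mid = low + (high-low) // 2
--     otherInterval = intervals[mid]
--
--     if(interval == otherInterval ):
--         return mid+1
--     elif(interval > otherInterval):
--         return binarySearchRec(interval, intervals, mid+1, high)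
--     else:
--         return binarySearchRec(interval, intervals, low, mid-1)
--
-- def binary_match(w, I):
--     if len(I) == 0 :
--         return False
--
--     begin_idx = 0
--     end_idx = 1
--     index = binarySearch(w, I)
--
--     if index == 0:
--         prev = (-INFINITY,-INFINITY) #If there is no prev, makes that match fail
--         next = I[index]
--     elif index == len(I):
--         prev = I[index-1]
--         next = (INFINITY, INFINITY) #If there is no next, makes that match fail
--     else:
--         prev = I[index -1]
--         next = I[index]
--
--     return w[begin_idx]<= prev[end_idx] or w[end_idx] >= next[begin_idx]
--
-- def proportion_of(A, B):
--     proportions = dict()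
--
--     for chan, A_events in A.items():
--         matches = 0
--         tot = len(A_events)
--
--         if chan not in B.keys():
--             proportions[chan] = matches, tot
--             continue #0 matches for this key
--
--         B_events = B[chan]
--         B_events.sort() #order them by begin time
--         for evt in A_events:
--             if binary_match(evt, B_events):
--                 matches+= 1
--
--         proportions[chan] = matches, tot
--
--     return proportions
-- ===== SOURCE B (Python) =====
-- def proportion_of(A, B):
--     # One sorted merge-sweep per channel (monotone pointer) instead of an
--     # independent recursive binary search per event.
--     proportions = {}
--     for chan, A_events in A.items():
--         tot = len(A_events)
--         if chan not in B:
--             proportions[chan] = (0, tot)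
--             continue
--         B_events = B[chan]
--         B_events.sort()  # same in-place sort of B[chan] as the original
--         m = len(B_events)
--         matches = 0
--         j = 0
--         for a in sorted(A_events):
--             while j < m and B_events[j] <= a:
--                 j += 1
--             if j > 0 and a[0] <= B_events[j - 1][1]:
--                 matches += 1
--             elif j < m and a[1] >= B_events[j][0]:
--                 matches += 1
--         proportions[chan] = (matches, tot)
--     return proportions
-- ===== Notes on version B (the rewrite author's own statement) =====
-- stated objective: alternative
-- what changed: Replaces the per-event recursive binary search over sorted B with a single merge sweep: A's events are sorted once per channel and a monotone pointer j walks the sorted B list, so each event's neighbours (prev/next) are found in amortized O(1) without recursion or infinity sentinels.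
import Mathlib
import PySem

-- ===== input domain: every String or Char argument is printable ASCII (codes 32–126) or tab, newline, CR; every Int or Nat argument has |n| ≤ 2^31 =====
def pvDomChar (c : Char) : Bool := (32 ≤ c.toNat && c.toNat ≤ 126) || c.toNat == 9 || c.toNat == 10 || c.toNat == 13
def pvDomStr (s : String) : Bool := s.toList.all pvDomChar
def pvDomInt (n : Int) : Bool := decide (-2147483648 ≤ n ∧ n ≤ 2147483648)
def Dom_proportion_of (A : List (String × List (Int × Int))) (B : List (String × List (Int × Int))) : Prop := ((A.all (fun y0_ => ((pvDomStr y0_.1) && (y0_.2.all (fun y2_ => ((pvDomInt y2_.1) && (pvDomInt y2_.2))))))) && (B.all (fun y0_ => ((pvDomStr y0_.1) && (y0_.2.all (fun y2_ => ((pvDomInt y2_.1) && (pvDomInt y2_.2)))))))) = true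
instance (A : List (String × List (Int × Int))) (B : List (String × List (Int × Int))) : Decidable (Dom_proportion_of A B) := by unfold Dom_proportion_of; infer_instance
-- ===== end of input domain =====

-- ===== PORT A =====
-- B changes: one sorted merge sweep with a monotone pointer per channel instead of a
-- recursive binary search per event (an alternative algorithm of similar cost); equivalence is
-- about the RETURN value only (both Pythons sort B[chan] in place; B also sorts a copy of A's events).

-- Python tuple comparison on pairs of ints (lexicographic).
def pyLt (a b : Int × Int) : Bool := decide (a.1 < b.1) || (decide (a.1 = b.1) && decide (a.2 < b.2))
def pyLe (a b : Int × Int) : Bool := decide (a.1 < b.1) || (decide (a.1 = b.1) && decide (a.2 ≤ b.2))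

def binarySearchRec (w : Int × Int) (I : List (Int × Int)) (low high : Int) : Option Int :=
  if high ≤ low then
    match PySem.List.pyGet? I low with   -- intervals[low]; none = IndexError (never hit: see bsr_spec)
    | none => none
    | some v => some (if pyLe v w then low + 1 else low)
  else
    let mid := low + PySem.Int.floordiv (high - low) 2
    match PySem.List.pyGet? I mid with
    | none => none
    | some other =>
      if w = other then some (mid + 1)
      else if pyLt other w then binarySearchRec w I (mid + 1) high
      else binarySearchRec w I low (mid - 1)
termination_by (high - low).toNat
decreasing_by
  · have h2 : PySem.Int.floordiv (high - low) 2 = (high - low) / 2 :=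
      PySem.Int.floordiv_eq_ediv_of_pos (by norm_num : (0:Int) < 2)
    omega
  · have h2 : PySem.Int.floordiv (high - low) 2 = (high - low) / 2 :=
      PySem.Int.floordiv_eq_ediv_of_pos (by norm_num : (0:Int) < 2)
    omega

def binarySearch (w : Int × Int) (I : List (Int × Int)) : Option Int :=
  if I.length = 0 then some 0
  else binarySearchRec w I 0 ((I.length : Int) - 1)

def binary_match (w : Int × Int) (I : List (Int × Int)) : Option Bool :=
  if I.length = 0 then some false
  else
    match binarySearch w I with
    | none => none
    | some index =>
      if index = 0 then
        -- prev = (-INFINITY, -INFINITY): the disjunct w[0] <= prev[1] is False for every int w[0] (exact)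
        match PySem.List.pyGet? I index with
        | none => none
        | some next => some (decide (w.2 ≥ next.1))
      else if index = (I.length : Int) then
        -- next = (INFINITY, INFINITY): the disjunct w[1] >= next[0] is False for every int w[1] (exact)
        match PySem.List.pyGet? I (index - 1) with
        | none => none
        | some prev => some (decide (w.1 ≤ prev.2))
      else
        match PySem.List.pyGet? I (index - 1), PySem.List.pyGet? I index with
        | some prev, some next => some (decide (w.1 ≤ prev.2) || decide (w.2 ≥ next.1))
        | _, _ => none

def proportion_of (A : List (String × List (Int × Int))) (B : List (String × List (Int × Int))) : List (String × Int × Int) :=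
  let dA := PySem.Dict.ofList A
  let dB := PySem.Dict.ofList B
  dA.items.foldl (fun proportions p =>
    let tot : Int := (p.2.length : Int)
    if PySem.Dict.contains dB p.1 = false then
      proportions ++ [(p.1, 0, tot)]
    else
      -- B_events = B[chan]; B_events.sort()  (key present: getD's default is never read)
      let B_events := PySem.List.sorted2 (PySem.Dict.getD dB p.1 []) Prod.fst Prod.snd
      let cnt := p.2.foldl (fun cnt evt =>
        match binary_match evt B_events with
        | some true => cnt + 1
        | _ => cnt) (0 : Int)
      proportions ++ [(p.1, cnt, tot)]) []

-- ===== PORT B =====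

-- while j < m and B_events[j] <= a: j += 1
def sweepAdvance (B_events : List (Int × Int)) (a : Int × Int) (j : Nat) : Nat :=
  if h : j < B_events.length then
    if pyLe B_events[j] a then sweepAdvance B_events a (j + 1) else j
  else j
termination_by B_events.length - j

-- loop body of the sweep: locate a's neighbours with the monotone pointer st.2, then test them
-- (m = B_events.length; indexing B_events[j-1] / B_events[j] is guarded, so getD's default is never read)
def sweepStep (B_events : List (Int × Int)) (st : Int × Nat) (a : Int × Int) : Int × Nat :=
  let j := sweepAdvance B_events a st.2
  if 0 < j ∧ a.1 ≤ (B_events.getD (j - 1) (0, 0)).2 then (st.1 + 1, j)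
  else if j < B_events.length ∧ a.2 ≥ (B_events.getD j (0, 0)).1 then (st.1 + 1, j)
  else (st.1, j)

def proportion_of_alt (A : List (String × List (Int × Int))) (B : List (String × List (Int × Int))) : List (String × Int × Int) :=
  let dA := PySem.Dict.ofList A
  let dB := PySem.Dict.ofList B
  dA.items.foldl (fun proportions p =>
    let tot : Int := (p.2.length : Int)
    if PySem.Dict.contains dB p.1 = false then
      proportions ++ [(p.1, 0, tot)]
    else
      let B_events := PySem.List.sorted2 (PySem.Dict.getD dB p.1 []) Prod.fst Prod.snd
      -- state (matches, j), one sweepStep per event of the sorted copy of A's events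
      let res := (PySem.List.sorted2 p.2 Prod.fst Prod.snd).foldl (sweepStep B_events) ((0 : Int), (0 : Nat))
      proportions ++ [(p.1, res.1, tot)]) []

-- ===== PRECONDITION & SPEC =====
def Spec_proportion_of (A : List (String × List (Int × Int))) (B : List (String × List (Int × Int))) (out : List (String × Int × Int)) : Prop := out = proportion_of_alt A B
instance (A : List (String × List (Int × Int))) (B : List (String × List (Int × Int))) (out : List (String × Int × Int)) : Decidable (Spec_proportion_of A B out) := by unfold Spec_proportion_of; infer_instance

-- ===== CLAIM (what is proved, stated in full; the proofs are below) =====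
def Claim_equal_proportion_of : Prop := ∀ (A : List (String × List (Int × Int))) (B : List (String × List (Int × Int))), Dom_proportion_of A B → Spec_proportion_of A B (proportion_of A B)

-- ===== LEMMAS AND PROOFS =====

-- Bridges from the Bool tuple comparisons to the lexicographic linear order on Int ×ₗ Int.
theorem pyLe_iff (a b : Int × Int) : pyLe a b = true ↔ toLex a ≤ toLex b := by
  simp [pyLe, Prod.Lex.le_iff]

theorem pyLt_iff (a b : Int × Int) : pyLt a b = true ↔ toLex a < toLex b := by
  simp [pyLt, Prod.Lex.lt_iff]

-- number of elements ≤ w / < w (lexicographically) — bisect_right / bisect_left of a sorted list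
def cLE (S : List (Int × Int)) (w : Int × Int) : Nat := S.countP (fun b => pyLe b w)
def cLT (S : List (Int × Int)) (w : Int × Int) : Nat := S.countP (fun b => pyLt b w)

def Sorted (S : List (Int × Int)) : Prop := S.Pairwise (fun a b => toLex a ≤ toLex b)

theorem foldl_insertBy_pairwise {α κ : Type} [LinearOrder κ] (key : α → κ) :
    ∀ (xs acc : List α), List.Pairwise (fun a b => key a ≤ key b) acc →
    List.Pairwise (fun a b => key a ≤ key b)
      (xs.foldl (fun acc x => PySem.List.insertBy (fun a b => decide (key a < key b)) x acc) acc) := by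
  intro xs
  induction xs with
  | nil => intro acc h; exact h
  | cons x t ih => intro acc h; exact ih _ (PySem.List.insertBy_pairwise_le key x acc h)

theorem sorted2_sorted (xs : List (Int × Int)) : Sorted (PySem.List.sorted2 xs Prod.fst Prod.snd) := by
  have hbefore : (fun (a b : Int × Int) => (decide (a.1 < b.1) || (!decide (b.1 < a.1) && decide (a.2 < b.2))))
      = fun a b => decide (toLex a < toLex b) := by
    funext a b
    rcases lt_trichotomy a.1 b.1 with h | h | h <;>
      simp [Prod.Lex.lt_iff, h, not_lt_of_gt]
  show List.Pairwise (fun a b => toLex a ≤ toLex b)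
      (xs.foldl (fun acc x => PySem.List.insertBy
        (fun a b => (decide (a.1 < b.1) || (!decide (b.1 < a.1) && decide (a.2 < b.2)))) x acc) [])
  rw [hbefore]
  exact foldl_insertBy_pairwise (fun p : Int × Int => toLex p) xs [] List.Pairwise.nil

theorem sorted_getElem_mono {S : List (Int × Int)} (hS : Sorted S) {i j : Nat} (hij : i ≤ j)
    (hj : j < S.length) : toLex S[i] ≤ toLex S[j] := by
  rcases Nat.lt_or_ge i j with h | h
  · exact (List.pairwise_iff_getElem.mp hS) i j (by omega) hj h
  · have : i = j := by omega
    subst this; exact le_refl _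

-- characterization of countP on a sorted list for a ≤-downward-closed predicate
theorem countP_char {S : List (Int × Int)} (hS : Sorted S) (q : (Int × Int) → Bool)
    (hq : ∀ a b : Int × Int, toLex a ≤ toLex b → q b = true → q a = true) :
    ∀ i (h : i < S.length), (q S[i] = true ↔ i < S.countP q) := by
  induction S with
  | nil => intro i h; simp at h
  | cons x t ih =>
    have hx : ∀ b ∈ t, toLex x ≤ toLex b := (List.pairwise_cons.mp hS).1
    have ht : Sorted t := (List.pairwise_cons.mp hS).2
    intro i h
    by_cases hqx : q x = true
    · cases i with
      | zero => simp [hqx]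
      | succ n =>
        have hn : n < t.length := by simpa using h
        have hiff := ih ht n hn
        have hc2 : (x :: t).countP q = t.countP q + 1 := by simp [hqx]
        simp only [List.getElem_cons_succ]
        rw [hiff, hc2]
        omega
    · have hz : t.countP q = 0 := by
        rw [List.countP_eq_zero]
        intro b hb hqb
        exact hqx (hq x b (hx b hb) hqb)
      have hz2 : (x :: t).countP q = 0 := by simp [hz, hqx]
      rw [hz2]
      simp only [Nat.not_lt_zero, iff_false]
      cases i with
      | zero => simpa using hqx
      | succ n =>
        have hn : n < t.length := by simpa using h
        intro hqb
        exact hqx (hq x _ (hx _ (List.getElem_mem hn)) hqb)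

theorem countP_eq_of_char {S : List (Int × Int)} (hS : Sorted S) (q : (Int × Int) → Bool)
    (hq : ∀ a b : Int × Int, toLex a ≤ toLex b → q b = true → q a = true)
    (c : Nat) (hc : c ≤ S.length) (h : ∀ i (hi : i < S.length), (q S[i] = true ↔ i < c)) :
    S.countP q = c := by
  have hlen : S.countP q ≤ S.length := List.countP_le_length
  rcases Nat.lt_trichotomy (S.countP q) c with hlt | he | hgt
  · have h1 := (h (S.countP q) (by omega)).mpr hlt
    have h2 := (countP_char hS q hq (S.countP q) (by omega)).mp h1
    omega
  · exact he
  · have h1 := (countP_char hS q hq c (by omega)).mpr hgt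
    have h2 := (h c (by omega)).mp h1
    omega

theorem le_dc (w : Int × Int) : ∀ a b : Int × Int, toLex a ≤ toLex b → pyLe b w = true → pyLe a w = true := by
  intro a b hab hb
  rw [pyLe_iff] at *
  exact le_trans hab hb

theorem lt_dc (w : Int × Int) : ∀ a b : Int × Int, toLex a ≤ toLex b → pyLt b w = true → pyLt a w = true := by
  intro a b hab hb
  rw [pyLt_iff] at *
  exact lt_of_le_of_lt hab hb

theorem cLE_le_length (S : List (Int × Int)) (w : Int × Int) : cLE S w ≤ S.length :=
  List.countP_le_length
theorem cLT_le_cLE (S : List (Int × Int)) (w : Int × Int) : cLT S w ≤ cLE S w := by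
  apply List.countP_mono_left
  intro b _ hb
  rw [pyLt_iff] at hb
  rw [pyLe_iff]
  exact le_of_lt hb

theorem pyLe_refl (a : Int × Int) : pyLe a a = true := by simp [pyLe]
theorem pyLt_irrefl (a : Int × Int) : pyLt a a = false := by simp [pyLt]
theorem pyLt_to_pyLe {a b : Int × Int} (h : pyLt a b = true) : pyLe a b = true := by
  rw [pyLt_iff] at h; rw [pyLe_iff]; exact le_of_lt h
theorem pyLe_asymm {a b : Int × Int} (h : pyLt a b = true) : pyLe b a = false := by
  rw [pyLt_iff] at h
  cases hb : pyLe b a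
  · rfl
  · rw [pyLe_iff] at hb; exact absurd hb (not_le_of_gt h)
theorem pyLt_total {a b : Int × Int} (hne : ¬ a = b) (h : pyLt a b = false) : pyLt b a = true := by
  rw [pyLt_iff]
  rcases lt_or_ge (toLex b) (toLex a) with hlt | hge
  · exact hlt
  · exfalso
    rcases lt_or_eq_of_le hge with hlt | heq
    · rw [← pyLt_iff] at hlt; simp [h] at hlt
    · exact hne (toLex.injective heq)

theorem pyGet?_inRange {S : List (Int × Int)} {i : Int} (h0 : 0 ≤ i) (h : i < (S.length : Int)) :
    PySem.List.pyGet? S i = some (S[i.toNat]'(by omega)) := by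
  have hnat := PySem.List.pyGet?_natCast S i.toNat
  rw [List.getElem?_eq_getElem (by omega)] at hnat
  have hi : ((i.toNat : Nat) : Int) = i := by omega
  rw [hi] at hnat
  exact hnat

-- the heart of the A side: where the home-grown binary search lands on a sorted list
theorem bsr_spec {S : List (Int × Int)} (hS : Sorted S) (w : Int × Int) :
    ∀ (low high : Int), 0 ≤ low → low < (S.length : Int) → low - 1 ≤ high → high ≤ (S.length : Int) - 1 →
    (∀ i : Nat, (hi : i < S.length) → (i : Int) < low → pyLt S[i] w = true) →
    (∀ i : Nat, (hi : i < S.length) → high < (i : Int) → pyLt w S[i] = true) →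
    ∃ idx : Int, binarySearchRec w S low high = some idx ∧
      (cLT S w : Int) ≤ idx ∧ idx ≤ (cLE S w : Int) ∧ (cLT S w < cLE S w → (cLT S w : Int) < idx) := by
  have hcLE : ∀ i (hi : i < S.length), (pyLe S[i] w = true ↔ i < cLE S w) :=
    countP_char hS (fun b => pyLe b w) (le_dc w)
  have hcLT : ∀ i (hi : i < S.length), (pyLt S[i] w = true ↔ i < cLT S w) :=
    countP_char hS (fun b => pyLt b w) (lt_dc w)
  have hLTLE := cLT_le_cLE S w
  have hLElen := cLE_le_length S w
  intro low high
  induction low, high using binarySearchRec.induct w S with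
  | case1 low high hterm hnone =>
    intro h0 hlen _ _ _ _
    rw [pyGet?_inRange h0 hlen] at hnone
    exact absurd hnone (by simp)
  | case2 low high hterm v hsome =>
    intro h0 hlen hlh hhi hL hH
    have hv : v = S[low.toNat]'(by omega) := by
      rw [pyGet?_inRange h0 hlen] at hsome
      exact (Option.some_injective _ hsome).symm
    have hres : binarySearchRec w S low high
        = some (if pyLe v w then low + 1 else low) := by
      rw [binarySearchRec]
      simp [hterm, hsome]
    cases hb : pyLe v w
    · -- interval < intervals[low] : index = low, and cLE = low.toNat
      have hk : cLE S w = low.toNat := by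
        apply countP_eq_of_char hS _ (le_dc w) _ (by omega)
        intro i hi
        rcases Nat.lt_trichotomy i low.toNat with hil | hie | hig
        · exact ⟨fun _ => by omega, fun _ => pyLt_to_pyLe (hL i hi (by omega))⟩
        · subst hie
          refine ⟨fun hx => ?_, fun hx => by omega⟩
          rw [← hv] at hx; simp [hb] at hx
        · refine ⟨fun hx => ?_, fun hx => by omega⟩
          have := pyLe_asymm (hH i hi (by omega))
          simp [this] at hx
      refine ⟨low, by rw [hres]; simp [hb], by omega, by omega, by omega⟩
    · -- interval >= intervals[low] : index = low + 1, and cLE = low.toNat + 1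
      have hk : cLE S w = low.toNat + 1 := by
        apply countP_eq_of_char hS _ (le_dc w) _ (by omega)
        intro i hi
        rcases Nat.lt_trichotomy i low.toNat with hil | hie | hig
        · exact ⟨fun _ => by omega, fun _ => pyLt_to_pyLe (hL i hi (by omega))⟩
        · subst hie
          refine ⟨fun _ => by omega, fun _ => by rw [← hv]; exact hb⟩
        · refine ⟨fun hx => ?_, fun hx => by omega⟩
          have := pyLe_asymm (hH i hi (by omega))
          simp [this] at hx
      refine ⟨low + 1, by rw [hres]; simp [hb], by omega, by omega, by omega⟩
  | case3 low high hterm mid hnone =>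
    intro h0 hlen hlh hhi hL hH
    have hfd : PySem.Int.floordiv (high - low) 2 = (high - low) / 2 :=
      PySem.Int.floordiv_eq_ediv_of_pos (by norm_num : (0:Int) < 2)
    have hnone' : PySem.List.pyGet? S (low + PySem.Int.floordiv (high - low) 2) = none := hnone
    rw [pyGet?_inRange (by rw [hfd]; omega) (by rw [hfd]; omega)] at hnone'
    exact absurd hnone' (by simp)
  | case4 low high hterm mid hsome =>
    intro h0 hlen hlh hhi hL hH
    have hfd : PySem.Int.floordiv (high - low) 2 = (high - low) / 2 :=
      PySem.Int.floordiv_eq_ediv_of_pos (by norm_num : (0:Int) < 2)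
    have hmid0 : (0:Int) ≤ low + PySem.Int.floordiv (high - low) 2 := by rw [hfd]; omega
    have hmidlen : low + PySem.Int.floordiv (high - low) 2 < (S.length : Int) := by rw [hfd]; omega
    have hmide : mid = low + PySem.Int.floordiv (high - low) 2 := rfl
    have hget : PySem.List.pyGet? S (low + PySem.Int.floordiv (high - low) 2) = some w := hsome
    have hget2 : PySem.List.pyGet? S (low + (high - low) / 2) = some w := by
      rw [← hfd]; exact hget
    have hw : S[(low + PySem.Int.floordiv (high - low) 2).toNat]'(by omega) = w := by
      rw [pyGet?_inRange hmid0 hmidlen] at hget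
      exact Option.some_injective _ hget
    have hres : binarySearchRec w S low high
        = some (low + PySem.Int.floordiv (high - low) 2 + 1) := by
      rw [binarySearchRec]
      simp [hterm, hget2]
    have h1 : (low + PySem.Int.floordiv (high - low) 2).toNat < cLE S w := by
      rw [← hcLE (low + PySem.Int.floordiv (high - low) 2).toNat (by omega)]
      rw [hw]; exact pyLe_refl w
    have h2 : cLT S w ≤ (low + PySem.Int.floordiv (high - low) 2).toNat := by
      by_contra hc
      have := (hcLT (low + PySem.Int.floordiv (high - low) 2).toNat (by omega)).mpr (by omega)
      rw [hw] at this
      simp [pyLt_irrefl] at this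
    refine ⟨low + PySem.Int.floordiv (high - low) 2 + 1, hres, by omega,
      by omega, by omega⟩
  | case5 low high hterm mid v hsome hne hlt ih =>
    intro h0 hlen hlh hhi hL hH
    have hfd : PySem.Int.floordiv (high - low) 2 = (high - low) / 2 :=
      PySem.Int.floordiv_eq_ediv_of_pos (by norm_num : (0:Int) < 2)
    have hmid0 : (0:Int) ≤ low + PySem.Int.floordiv (high - low) 2 := by rw [hfd]; omega
    have hmidlen : low + PySem.Int.floordiv (high - low) 2 < (S.length : Int) := by rw [hfd]; omega
    have hmide : mid = low + PySem.Int.floordiv (high - low) 2 := rfl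
    have hget : PySem.List.pyGet? S (low + PySem.Int.floordiv (high - low) 2) = some v := hsome
    have hget2 : PySem.List.pyGet? S (low + (high - low) / 2) = some v := by
      rw [← hfd]; exact hget
    have hv : v = S[(low + PySem.Int.floordiv (high - low) 2).toNat]'(by omega) := by
      rw [pyGet?_inRange hmid0 hmidlen] at hget
      exact (Option.some_injective _ hget).symm
    have hres : binarySearchRec w S low high
        = binarySearchRec w S (low + PySem.Int.floordiv (high - low) 2 + 1) high := by
      rw [binarySearchRec]
      simp [hterm, hget2, hne, hlt]
    obtain ⟨idx, heq, hb1, hb2, hb3⟩ := ih (by omega) (by omega) (by omega)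
      hhi
      (by
        intro i hi hilt
        rw [pyLt_iff]
        have hle : toLex (S[i]'hi) ≤ toLex (S[(low + PySem.Int.floordiv (high - low) 2).toNat]'(by omega)) :=
          sorted_getElem_mono hS (by omega) (by omega)
        have hvw : toLex v < toLex w := (pyLt_iff v w).mp hlt
        rw [hv] at hvw
        exact lt_of_le_of_lt hle hvw)
      hH
    exact ⟨idx, by rw [hres]; exact heq, hb1, hb2, hb3⟩
  | case6 low high hterm mid v hsome hne hnlt ih =>
    intro h0 hlen hlh hhi hL hH
    have hfd : PySem.Int.floordiv (high - low) 2 = (high - low) / 2 :=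
      PySem.Int.floordiv_eq_ediv_of_pos (by norm_num : (0:Int) < 2)
    have hmid0 : (0:Int) ≤ low + PySem.Int.floordiv (high - low) 2 := by rw [hfd]; omega
    have hmidlen : low + PySem.Int.floordiv (high - low) 2 < (S.length : Int) := by rw [hfd]; omega
    have hmide : mid = low + PySem.Int.floordiv (high - low) 2 := rfl
    have hget : PySem.List.pyGet? S (low + PySem.Int.floordiv (high - low) 2) = some v := hsome
    have hget2 : PySem.List.pyGet? S (low + (high - low) / 2) = some v := by
      rw [← hfd]; exact hget
    have hv : v = S[(low + PySem.Int.floordiv (high - low) 2).toNat]'(by omega) := by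
      rw [pyGet?_inRange hmid0 hmidlen] at hget
      exact (Option.some_injective _ hget).symm
    have hwv : pyLt w v = true := pyLt_total (fun h => hne h.symm) (by simpa using hnlt)
    have hres : binarySearchRec w S low high
        = binarySearchRec w S low (low + PySem.Int.floordiv (high - low) 2 - 1) := by
      rw [binarySearchRec]
      simp [hterm, hget2, hne, hnlt]
    obtain ⟨idx, heq, hb1, hb2, hb3⟩ := ih h0 hlen (by omega)
      (by omega) hL
      (by
        intro i hi hgt
        rw [pyLt_iff]
        have hle : toLex (S[(low + PySem.Int.floordiv (high - low) 2).toNat]'(by omega)) ≤ toLex (S[i]'hi) :=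
          sorted_getElem_mono hS (by omega) hi
        have hvw : toLex w < toLex v := (pyLt_iff w v).mp hwv
        rw [hv] at hvw
        exact lt_of_lt_of_le hvw hle)
    exact ⟨idx, by rw [hres]; exact heq, hb1, hb2, hb3⟩

-- per-event predicate of the B sweep, evaluated at the bisect-right position
def evtMatch (S : List (Int × Int)) (a : Int × Int) : Bool :=
  decide ((0 < cLE S a ∧ a.1 ≤ (S.getD (cLE S a - 1) (0, 0)).2) ∨
          (cLE S a < S.length ∧ a.2 ≥ (S.getD (cLE S a) (0, 0)).1))

theorem pyLe_false_lt {a b : Int × Int} (h : pyLe a b = false) : toLex b < toLex a := by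
  rcases lt_or_ge (toLex b) (toLex a) with hlt | hge
  · exact hlt
  · rw [← pyLe_iff] at hge; simp [h] at hge

theorem eq_of_le_not_lt {a w : Int × Int} (h1 : pyLe a w = true) (h2 : pyLt a w = false) : a = w := by
  rw [pyLe_iff] at h1
  apply toLex.injective
  rcases lt_or_eq_of_le h1 with hlt | heq
  · rw [← pyLt_iff] at hlt; simp [h2] at hlt
  · exact heq

-- if w is lexicographically below v yet v.1 ≤ w.2, then w.1 ≤ w.2
theorem lex_subsume {w v : Int × Int} (hlt : toLex w < toLex v) (h : v.1 ≤ w.2) : w.1 ≤ w.2 := by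
  rw [Prod.Lex.lt_iff] at hlt
  simp only [ofLex_toLex] at hlt
  rcases hlt with h1 | ⟨h1, _⟩ <;> omega

-- A's binary_match computes exactly evtMatch on a sorted list
theorem binary_match_eq {S : List (Int × Int)} (hS : Sorted S) (w : Int × Int) :
    binary_match w S = some (evtMatch S w) := by
  by_cases hlen : S.length = 0
  · have : S = [] := List.length_eq_zero_iff.mp hlen
    subst this
    simp [binary_match, evtMatch, cLE]
  · have hlen' : 0 < S.length := Nat.pos_of_ne_zero hlen
    have hcLE : ∀ i (hi : i < S.length), (pyLe S[i] w = true ↔ i < cLE S w) :=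
      countP_char hS (fun b => pyLe b w) (le_dc w)
    have hcLT : ∀ i (hi : i < S.length), (pyLt S[i] w = true ↔ i < cLT S w) :=
      countP_char hS (fun b => pyLt b w) (lt_dc w)
    have hLTLE := cLT_le_cLE S w
    have hLElen := cLE_le_length S w
    obtain ⟨idx, heq, hb1, hb2, hb3⟩ := bsr_spec hS w 0 ((S.length : Int) - 1)
      (by omega) (by omega) (by omega) (by omega)
      (fun i hi h => absurd h (by omega)) (fun i hi h => absurd h (by omega))
    have hbs : binarySearch w S = some idx := by
      rw [binarySearch]
      simp only [hlen, if_false]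
      exact heq
    rw [binary_match, hbs]
    simp only [hlen, if_false]
    by_cases ht : cLT S w = cLE S w
    · -- w does not occur in S: idx is exactly bisect_right = cLE
      have hidx : idx = (cLE S w : Int) := by omega
      by_cases hk0 : cLE S w = 0
      · -- index == 0
        have hi0 : idx = 0 := by omega
        rw [if_pos hi0, hi0, pyGet?_inRange (by omega) (by omega)]
        have hres : evtMatch S w
            = decide (w.2 ≥ (S[(0:Int).toNat]'(by omega)).1) := by
          unfold evtMatch
          rw [List.getD_eq_getElem S (0,0) (by omega : cLE S w < S.length)]
          simp [hk0, hlen']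
        rw [hres]
      · -- index ≠ 0
        have hi0 : ¬ idx = 0 := by omega
        rw [if_neg hi0]
        have hprev : PySem.List.pyGet? S (idx - 1)
            = some (S[cLE S w - 1]'(by omega)) := by
          rw [pyGet?_inRange (by omega) (by omega)]
          congr 1
          exact getElem_congr rfl (by omega) _
        have hprevD : S.getD (cLE S w - 1) (0,0) = S[cLE S w - 1]'(by omega) :=
          List.getD_eq_getElem S (0,0) (by omega)
        by_cases hkl : cLE S w = S.length
        · -- index == len(I)
          have hil : idx = (S.length : Int) := by omega
          rw [if_pos hil, hprev]
          have hres : evtMatch S w = decide (w.1 ≤ (S[cLE S w - 1]'(by omega)).2) := by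
            unfold evtMatch
            rw [hprevD]
            apply decide_eq_decide.mpr
            constructor
            · rintro (⟨_, h⟩ | ⟨hkl2, _⟩)
              · exact h
              · exact absurd hkl2 (by omega)
            · intro h
              exact Or.inl ⟨by omega, h⟩
          rw [hres]
        · -- 0 < index < len(I)
          have hil : ¬ idx = (S.length : Int) := by omega
          rw [if_neg hil, hprev, pyGet?_inRange (by omega) (by omega)]
          have hnextg : S[idx.toNat]'(by omega) = S[cLE S w]'(by omega) :=
            getElem_congr rfl (by omega) _
          have hnextD : S.getD (cLE S w) (0,0) = S[cLE S w]'(by omega) :=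
            List.getD_eq_getElem S (0,0) (by omega)
          rw [hnextg]
          have hres : evtMatch S w = (decide (w.1 ≤ (S[cLE S w - 1]'(by omega)).2)
              || decide (w.2 ≥ (S[cLE S w]'(by omega)).1)) := by
            unfold evtMatch
            rw [hprevD, hnextD, ← Bool.decide_or]
            apply decide_eq_decide.mpr
            constructor
            · rintro (⟨_, h⟩ | ⟨_, h⟩)
              · exact Or.inl h
              · exact Or.inr h
            · rintro (h | h)
              · exact Or.inl ⟨Nat.pos_of_ne_zero hk0, h⟩
              · exact Or.inr ⟨by omega, h⟩
          rw [hres]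
    · -- w occurs in S: prev = w, and both sides collapse to decide (w.1 ≤ w.2)
      have htk : cLT S w < cLE S w := by omega
      have hipos : 0 < idx := by have := hb3 htk; omega
      have hprevw : S[(idx - 1).toNat]'(by omega) = w :=
        eq_of_le_not_lt ((hcLE _ (by omega)).mpr (by omega))
          (by
            cases hx : pyLt (S[(idx - 1).toNat]'(by omega)) w
            · rfl
            · exact absurd ((hcLT _ (by omega)).mp hx) (by omega))
      have hkw : S[cLE S w - 1]'(by omega) = w :=
        eq_of_le_not_lt ((hcLE _ (by omega)).mpr (by omega))
          (by
            cases hx : pyLt (S[cLE S w - 1]'(by omega)) w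
            · rfl
            · exact absurd ((hcLT _ (by omega)).mp hx) (by omega))
      have hresR : evtMatch S w = decide (w.1 ≤ w.2) := by
        unfold evtMatch
        apply decide_eq_decide.mpr
        rw [List.getD_eq_getElem S (0,0) (by omega : cLE S w - 1 < S.length), hkw]
        constructor
        · rintro (⟨_, h⟩ | ⟨hkl, h⟩)
          · exact h
          · rw [List.getD_eq_getElem S (0,0) hkl] at h
            refine lex_subsume ?_ h
            exact pyLe_false_lt (by
              cases hx : pyLe (S[cLE S w]'hkl) w
              · rfl
              · exact absurd ((hcLE _ hkl).mp hx) (by omega))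
        · intro h
          exact Or.inl ⟨by omega, h⟩
      rw [hresR]
      have hi0 : ¬ idx = 0 := by omega
      rw [if_neg hi0]
      by_cases hil : idx = (S.length : Int)
      · rw [if_pos hil, pyGet?_inRange (by omega) (by omega), hprevw]
      · rw [if_neg hil, pyGet?_inRange (by omega) (by omega),
          pyGet?_inRange (by omega) (by omega), hprevw]
        by_cases hik : idx = (cLE S w : Int)
        · -- next is the first element strictly above w
          have hnlt : toLex w < toLex (S[idx.toNat]'(by omega)) :=
            pyLe_false_lt (by
              cases hx : pyLe (S[idx.toNat]'(by omega)) w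
              · rfl
              · exact absurd ((hcLE _ (by omega)).mp hx) (by omega))
          cases hd : decide (w.2 ≥ (S[idx.toNat]'(by omega)).1)
          · simp
            intro h2
            exact lex_subsume hnlt h2
          · have h2 : (S[idx.toNat]'(by omega)).1 ≤ w.2 := by simpa using hd
            have h1 : w.1 ≤ w.2 := lex_subsume hnlt h2
            simp [h1, h2]
        · -- next is w itself
          have hnw : S[idx.toNat]'(by omega) = w :=
            eq_of_le_not_lt ((hcLE _ (by omega)).mpr (by omega))
              (by
                cases hx : pyLt (S[idx.toNat]'(by omega)) w
                · rfl
                · exact absurd ((hcLT _ (by omega)).mp hx) (by omega))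
          rw [hnw]
          show some (decide (w.1 ≤ w.2) || decide (w.1 ≤ w.2)) = some (decide (w.1 ≤ w.2))
          rw [Bool.or_self]

theorem sweepAdvance_eq {S : List (Int × Int)} (hS : Sorted S) (a : Int × Int) :
    ∀ j : Nat, j ≤ cLE S a → sweepAdvance S a j = cLE S a := by
  have hchar : ∀ i (h : i < S.length), (pyLe S[i] a = true ↔ i < cLE S a) :=
    countP_char hS (fun b => pyLe b a) (le_dc a)
  have hkle : cLE S a ≤ S.length := cLE_le_length S a
  suffices H : ∀ n j, j ≤ cLE S a → cLE S a - j = n → sweepAdvance S a j = cLE S a by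
    intro j hj; exact H _ j hj rfl
  intro n
  induction n with
  | zero =>
    intro j hj he
    have hjk : j = cLE S a := by omega
    subst hjk
    rw [sweepAdvance]
    by_cases hlt : cLE S a < S.length
    · have hnle : pyLe (S[cLE S a]'hlt) a = false := by
        cases hpy : pyLe (S[cLE S a]'hlt) a
        · rfl
        · exact absurd ((hchar _ hlt).mp hpy) (by omega)
      simp [hlt, hnle]
    · simp [hlt]
  | succ n ih =>
    intro j hj he
    have hjk : j < cLE S a := by omega
    have hlt : j < S.length := by omega
    have hle : pyLe S[j] a = true := by rw [hchar j hlt]; omega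
    rw [sweepAdvance]
    simp only [hlt, dif_pos, hle, if_pos]
    exact ih (j + 1) (by omega) (by omega)

theorem cLE_mono {S : List (Int × Int)} {a b : Int × Int} (hab : toLex a ≤ toLex b) :
    cLE S a ≤ cLE S b := by
  apply List.countP_mono_left
  intro x _ hx
  rw [pyLe_iff] at hx
  rw [pyLe_iff]
  exact le_trans hx hab

theorem sweepStep_eq {S : List (Int × Int)} (hS : Sorted S) (m0 : Int) (j0 : Nat)
    (a : Int × Int) (hj : j0 ≤ cLE S a) :
    sweepStep S (m0, j0) a = (m0 + (if evtMatch S a then 1 else 0), cLE S a) := by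
  unfold sweepStep
  simp only []
  rw [show sweepAdvance S a (m0, j0).2 = cLE S a from sweepAdvance_eq hS a j0 hj]
  simp only [evtMatch, decide_eq_true_eq]
  by_cases c1 : 0 < cLE S a ∧ a.1 ≤ (S.getD (cLE S a - 1) (0, 0)).2
  · rw [if_pos c1, if_pos (Or.inl c1)]
  · rw [if_neg c1]
    by_cases c2 : cLE S a < S.length ∧ a.2 ≥ (S.getD (cLE S a) (0, 0)).1
    · rw [if_pos c2, if_pos (Or.inr c2)]
    · rw [if_neg c2, if_neg (by tauto)]
      simp

-- the B sweep counts evtMatch over its (sorted) event list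
theorem sweep_fold {S : List (Int × Int)} (hS : Sorted S) :
    ∀ (L : List (Int × Int)), Sorted L → ∀ (m0 : Int) (j0 : Nat), (∀ a ∈ L, j0 ≤ cLE S a) →
    (L.foldl (sweepStep S) (m0, j0)).1 = m0 + (L.countP (fun a => evtMatch S a) : Int) := by
  intro L
  induction L with
  | nil => intro _ m0 j0 _; simp
  | cons a t ih =>
    intro hL m0 j0 hinv
    have ha : ∀ b ∈ t, toLex a ≤ toLex b := (List.pairwise_cons.mp hL).1
    have ht : Sorted t := (List.pairwise_cons.mp hL).2
    rw [List.foldl_cons, sweepStep_eq hS m0 j0 a (hinv a List.mem_cons_self)]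
    rw [ih ht _ (cLE S a) (fun b hb => cLE_mono (ha b hb))]
    by_cases hm : evtMatch S a = true <;> simp [List.countP_cons, hm] <;> ring

-- A's inner loop counts evtMatch as well
theorem a_fold {S : List (Int × Int)} (hS : Sorted S) (L : List (Int × Int)) (m0 : Int) :
    L.foldl (fun cnt evt =>
      match binary_match evt S with
      | some true => cnt + 1
      | _ => cnt) m0 = m0 + (L.countP (fun a => evtMatch S a) : Int) := by
  induction L generalizing m0 with
  | nil => simp
  | cons a t ih =>
    rw [List.foldl_cons, binary_match_eq hS]
    cases hm : evtMatch S a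
    · simp only [hm]
      rw [ih]
      simp [hm]
    · simp only [hm]
      rw [ih]
      simp only [List.countP_cons, hm]
      push_cast
      ring

-- the two per-channel bodies agree
theorem step_eq (B : List (String × List (Int × Int))) (acc : List (String × Int × Int))
    (p : String × List (Int × Int)) :
    (let tot : Int := (p.2.length : Int)
     if PySem.Dict.contains (PySem.Dict.ofList B) p.1 = false then
       acc ++ [(p.1, 0, tot)]
     else
       let B_events := PySem.List.sorted2 (PySem.Dict.getD (PySem.Dict.ofList B) p.1 []) Prod.fst Prod.snd
       let cnt := p.2.foldl (fun cnt evt =>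
         match binary_match evt B_events with
         | some true => cnt + 1
         | _ => cnt) (0 : Int)
       acc ++ [(p.1, cnt, tot)])
    = (let tot : Int := (p.2.length : Int)
       if PySem.Dict.contains (PySem.Dict.ofList B) p.1 = false then
         acc ++ [(p.1, 0, tot)]
       else
         let B_events := PySem.List.sorted2 (PySem.Dict.getD (PySem.Dict.ofList B) p.1 []) Prod.fst Prod.snd
         let res := (PySem.List.sorted2 p.2 Prod.fst Prod.snd).foldl (sweepStep B_events) ((0 : Int), (0 : Nat))
         acc ++ [(p.1, res.1, tot)]) := by
  by_cases hc : PySem.Dict.contains (PySem.Dict.ofList B) p.1 = false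
  · simp only [hc, if_true]
  · simp only [hc, if_false]
    have hSort := sorted2_sorted (PySem.Dict.getD (PySem.Dict.ofList B) p.1 [])
    have hA := a_fold hSort p.2 (0 : Int)
    have hB := sweep_fold hSort (PySem.List.sorted2 p.2 Prod.fst Prod.snd) (sorted2_sorted p.2)
      (0 : Int) 0 (fun a _ => Nat.zero_le _)
    have hperm := (PySem.List.sorted2_perm p.2 Prod.fst Prod.snd false).countP_eq
      (fun a => evtMatch (PySem.List.sorted2 (PySem.Dict.getD (PySem.Dict.ofList B) p.1 []) Prod.fst Prod.snd) a)
    rw [hA, hB, hperm]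

-- ===== VERDICT (by name: the statement is the Claim_ definition above) =====
theorem proportion_of_spec : Claim_equal_proportion_of := by
  intro A B _
  unfold Spec_proportion_of proportion_of proportion_of_alt
  apply List.foldl_ext
  intro acc p _
  exact step_eq B acc p
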